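-- pv_equiv track=rewrite | github.com/ivaylo-nikolov5/Python-Course | Data Structures and Algorithms/Softuni/Lecture 5/salaries.py | dfs
-- ===== SOURCE A (Python) =====
-- def dfs(node, graph, salaries):
--     result = 0
--
--     if salaries[node]:
--         return salaries[node]
--     if not graph[node]:
--         return 1
--
--     for child in graph[node]:
--         result += dfs(child, graph, salaries)
--
--     salaries[node] = result
--     return result
-- ===== SOURCE B (Python) =====
-- def dfs(node, graph, salaries):
--     # Iterative bottom-up relaxation instead of memoized recursion; `salaries`
--     # is never mutated (A assigns salaries[node] in place; the claimed
--     # equivalence is about the return value).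
--     # A truthy cached salary is a node's final value; seed the table with them.
--     val = {k: v for k, v in salaries.items() if v}
--     for _ in range(len(graph) + 1):
--         for k, children in graph.items():
--             if k in val:
--                 continue
--             if not children:
--                 val[k] = 1
--             elif all(c in val for c in children):
--                 val[k] = sum(val[c] for c in children)
--     return val[node]
-- ===== Notes on version B (the rewrite author's own statement) =====
-- stated objective: alternative
-- what changed: Replaces the salaries-mutating memoized recursive DFS by an iterative round-based bottom-up relaxation: seed a fresh table with the truthy salaries, then repeatedly sweep graph.items() resolving every node whose children are all resolved; the return value is identical but salaries is never mutated (A assigns salaries[node] in place).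
import Mathlib
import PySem

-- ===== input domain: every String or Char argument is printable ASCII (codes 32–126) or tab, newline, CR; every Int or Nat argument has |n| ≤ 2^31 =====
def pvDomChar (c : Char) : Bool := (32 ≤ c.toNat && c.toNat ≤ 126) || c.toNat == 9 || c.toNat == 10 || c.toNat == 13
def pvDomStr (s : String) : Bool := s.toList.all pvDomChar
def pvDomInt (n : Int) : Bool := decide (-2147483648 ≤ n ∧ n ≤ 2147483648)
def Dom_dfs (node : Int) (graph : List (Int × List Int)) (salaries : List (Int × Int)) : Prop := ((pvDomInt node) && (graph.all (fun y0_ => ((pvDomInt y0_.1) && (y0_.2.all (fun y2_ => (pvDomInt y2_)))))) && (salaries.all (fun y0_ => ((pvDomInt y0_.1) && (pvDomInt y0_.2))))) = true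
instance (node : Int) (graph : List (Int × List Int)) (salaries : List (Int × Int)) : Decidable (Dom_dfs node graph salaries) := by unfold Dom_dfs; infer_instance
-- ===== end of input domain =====

-- B replaces A's salary-mutating memoized recursive DFS by an iterative round-based
-- bottom-up relaxation over a fresh value table; A assigns salaries[node] in place
-- and B never mutates `salaries`, so the equivalence claimed is about the return
-- value only.

-- ===== PORT A =====
-- A is recursive over a graph, so the Lean port carries a fuel bound; under
-- Pre_dfs (the recursion from `node` is well-founded and meets no missing key)
-- fuel `size + 1` exceeds the recursion depth, so the fuel-out branch is never
-- taken on admitted inputs.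
def dfsAux (fuel : Nat) (node : Int) (g : PySem.Dict Int (List Int))
    (s : PySem.Dict Int Int) : Int × PySem.Dict Int Int :=
  match fuel with
  | 0 => (0, s)
  | f + 1 =>
    let v := s.getD node 0
    if v ≠ 0 then (v, s)                        -- if salaries[node]: return salaries[node]
    else
      let cs := g.getD node []
      if cs = [] then (1, s)                    -- if not graph[node]: return 1
      else
        -- for child in graph[node]: result += dfs(child, graph, salaries)
        let r := cs.foldl (fun acc c =>
          let t := dfsAux f c g acc.2
          (acc.1 + t.1, t.2)) ((0 : Int), s)
        (r.1, r.2.insert node r.1)              -- salaries[node] = result; return result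

def dfs (node : Int) (graph : List (Int × List Int)) (salaries : List (Int × Int)) : Int :=
  let g := PySem.Dict.ofList graph
  (dfsAux (g.size + 1) node g (PySem.Dict.ofList salaries)).1

-- ===== PORT B =====
-- seed of Source B: val = {k: v for k, v in salaries.items() if v}
def seedB (s : PySem.Dict Int Int) : PySem.Dict Int Int :=
  s.items.foldl (fun val p => if p.2 ≠ 0 then val.insert p.1 p.2 else val) PySem.Dict.empty

-- one element step of the inner `for k, children in graph.items():` loop of Source B
def stepB (val : PySem.Dict Int Int) (p : Int × List Int) : PySem.Dict Int Int :=
  if val.contains p.1 then val                                   -- if k in val: continue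
  else if p.2 = [] then val.insert p.1 1                         -- if not children: val[k] = 1
  else if p.2.all (fun c => val.contains c) then                 -- elif all(c in val for c in children):
    val.insert p.1 ((p.2.map (fun c => val.getD c 0)).sum)       --   val[k] = sum(val[c] for c in children)
  else val

-- one pass of the outer `for _ in range(len(graph) + 1):` loop of Source B
def passB (g : PySem.Dict Int (List Int)) (val : PySem.Dict Int Int) : PySem.Dict Int Int :=
  g.items.foldl stepB val

def dfs_alt (node : Int) (graph : List (Int × List Int)) (salaries : List (Int × Int)) : Int :=
  let g := PySem.Dict.ofList graph
  let val := (List.range (g.size + 1)).foldl (fun val _ => passB g val)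
    (seedB (PySem.Dict.ofList salaries))
  val.getD node 0                                                -- return val[node]

-- ===== PRECONDITION & SPEC =====
-- `okS g s i k = true` : A's recursion started at k terminates cleanly within
-- depth i — k has a salaries entry, and it is truthy (immediate return) or k
-- has a graph entry all of whose children recurse cleanly one level lower.
def okS (g : PySem.Dict Int (List Int)) (s : PySem.Dict Int Int) : Nat → Int → Bool
  | 0, _ => false
  | i + 1, k =>
    s.contains k &&
      (decide (s.getD k 0 ≠ 0) || (g.contains k && (g.getD k []).all (okS g s i)))

-- Pre_dfs holds exactly when A's recursion from `node` is well-founded and meets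
-- no missing dict key (depth `size + 1` suffices: a derivation chain repeats no
-- graph key); outside it A raises KeyError or RecursionError.
def Pre_dfs (node : Int) (graph : List (Int × List Int)) (salaries : List (Int × Int)) : Prop :=
  okS (PySem.Dict.ofList graph) (PySem.Dict.ofList salaries)
    ((PySem.Dict.ofList graph).size + 1) node = true

instance (node : Int) (graph : List (Int × List Int)) (salaries : List (Int × Int)) : Decidable (Pre_dfs node graph salaries) := by unfold Pre_dfs; infer_instance

def pvWitness_dfs : Int × (List (Int × List Int)) × (List (Int × Int)) :=
  (1, [(1, [2, 3]), (2, []), (3, [])], [(1, 0), (2, 0), (3, 5)])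

def Spec_dfs (node : Int) (graph : List (Int × List Int)) (salaries : List (Int × Int)) (out : Int) : Prop := out = dfs_alt node graph salaries
instance (node : Int) (graph : List (Int × List Int)) (salaries : List (Int × Int)) (out : Int) : Decidable (Spec_dfs node graph salaries out) := by unfold Spec_dfs; infer_instance

-- ===== CLAIM (what is proved, stated in full; the proofs are below) =====
def Claim_equal_dfs : Prop := ∀ (node : Int) (graph : List (Int × List Int)) (salaries : List (Int × Int)), Dom_dfs node graph salaries → Pre_dfs node graph salaries → Spec_dfs node graph salaries (dfs node graph salaries)

-- ===== LEMMAS AND PROOFS =====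

-- the pure value both programs compute for a node: its salary if truthy, else 1
-- for a leaf, else the sum over its children (fuel-bounded approximation)
def pv (g : PySem.Dict Int (List Int)) (s : PySem.Dict Int Int) : Nat → Int → Int
  | 0, _ => 0
  | f + 1, n =>
    if s.getD n 0 ≠ 0 then s.getD n 0
    else if g.getD n [] = [] then 1
    else ((g.getD n []).map (pv g s f)).sum

-- `goodS g s i k` : the value of k is determined within i levels (truthy salary,
-- or all children determined one level lower); the semantic core of okS
def goodS (g : PySem.Dict Int (List Int)) (s : PySem.Dict Int Int) : Nat → Int → Bool
  | 0, _ => false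
  | i + 1, k => decide (s.getD k 0 ≠ 0) || (g.getD k []).all (goodS g s i)

theorem goodS_succ (g : PySem.Dict Int (List Int)) (s : PySem.Dict Int Int)
    (m : Nat) (k : Int) :
    goodS g s (m + 1) k
      = (decide (s.getD k 0 ≠ 0) || (g.getD k []).all (goodS g s m)) := rfl

theorem goodS_mono_succ (g : PySem.Dict Int (List Int)) (s : PySem.Dict Int Int) :
    ∀ i k, goodS g s i k = true → goodS g s (i + 1) k = true := by
  intro i
  induction i with
  | zero => intro k h; simp [goodS] at h
  | succ j ih =>
    intro k h
    rw [goodS_succ] at h ⊢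
    simp only [Bool.or_eq_true, List.all_eq_true] at h ⊢
    rcases h with h | h
    · exact Or.inl h
    · exact Or.inr (fun c hc => ih c (h c hc))

theorem goodS_mono (g : PySem.Dict Int (List Int)) (s : PySem.Dict Int Int)
    {i j : Nat} (h : i ≤ j) :
    ∀ k, goodS g s i k = true → goodS g s j k = true := by
  induction h with
  | refl => exact fun _ h => h
  | step _ ih => exact fun k hk => goodS_mono_succ g s _ k (ih k hk)

theorem okS_goodS (g : PySem.Dict Int (List Int)) (s : PySem.Dict Int Int) :
    ∀ i k, okS g s i k = true → goodS g s i k = true := by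
  intro i
  induction i with
  | zero => intro k h; simp [okS] at h
  | succ j ih =>
    intro k h
    simp only [okS, Bool.and_eq_true, Bool.or_eq_true, List.all_eq_true] at h
    rw [goodS_succ]
    simp only [Bool.or_eq_true, List.all_eq_true]
    rcases h.2 with h2 | h2
    · exact Or.inl h2
    · exact Or.inr (fun c hc => ih c (h2.2 c hc))

theorem pv_stab (g : PySem.Dict Int (List Int)) (s : PySem.Dict Int Int) :
    ∀ i k, goodS g s i k = true → ∀ a b, i ≤ a → i ≤ b → pv g s a k = pv g s b k := by
  intro i
  induction i with
  | zero => intro k h; simp [goodS] at h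
  | succ j ih =>
    intro k h a b ha hb
    obtain ⟨a', rfl⟩ : ∃ a', a = a' + 1 := ⟨a - 1, by omega⟩
    obtain ⟨b', rfl⟩ : ∃ b', b = b' + 1 := ⟨b - 1, by omega⟩
    simp only [goodS, Bool.or_eq_true, List.all_eq_true, decide_eq_true_eq] at h
    simp only [pv]
    rcases h with h | h
    · rw [if_pos h, if_pos h]
    · split_ifs with h1 h2
      · rfl
      · rfl
      · congr 1
        apply List.map_congr_left
        intro c hc
        exact ih c (h c hc) a' b' (by omega) (by omega)

-- A-side invariant over the mutated salaries dict: every truthy entry already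
-- holds its final value, and a falsy entry was falsy from the start
def InvA (g : PySem.Dict Int (List Int)) (s0 s : PySem.Dict Int Int) (N : Nat) : Prop :=
  ∀ k : Int,
    (s.getD k 0 ≠ 0 → s.getD k 0 = pv g s0 (N + 1) k) ∧
    (s.getD k 0 = 0 → s0.getD k 0 = 0)

theorem mainA (g : PySem.Dict Int (List Int)) (s0 : PySem.Dict Int Int) (N : Nat) :
    ∀ i, i ≤ N + 1 → ∀ n, goodS g s0 i n = true → ∀ f, i ≤ f → ∀ s, InvA g s0 s N →
      (dfsAux f n g s).1 = pv g s0 (N + 1) n ∧ InvA g s0 (dfsAux f n g s).2 N := by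
  intro i
  induction i with
  | zero => intro _ n hn; simp [goodS] at hn
  | succ j ih =>
    intro hle n hn f hf s hs
    obtain ⟨f', rfl⟩ : ∃ f', f = f' + 1 := ⟨f - 1, by omega⟩
    simp only [dfsAux]
    by_cases h1 : s.getD n 0 ≠ 0
    · rw [if_pos h1]
      exact ⟨(hs n).1 h1, hs⟩
    · rw [if_neg h1]
      have h1 : s.getD n 0 = 0 := not_ne_iff.mp h1
      have hsn0 : s0.getD n 0 = 0 := (hs n).2 h1
      have hcs : ∀ c ∈ g.getD n [], goodS g s0 j c = true := by
        simp only [goodS, Bool.or_eq_true, List.all_eq_true, decide_eq_true_eq] at hn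
        rcases hn with hn | hn
        · exact absurd hsn0 hn
        · exact hn
      by_cases h2 : g.getD n [] = []
      · rw [if_pos h2]
        refine ⟨?_, hs⟩
        simp only [pv, hsn0, h2]
        simp
      · rw [if_neg h2]
        have fold : ∀ (l : List Int), (∀ c ∈ l, goodS g s0 j c = true) → ∀ (acc : Int) s',
            InvA g s0 s' N →
            (l.foldl (fun acc c =>
              let t := dfsAux f' c g acc.2
              (acc.1 + t.1, t.2)) (acc, s')).1
              = acc + (l.map (pv g s0 (N + 1))).sum ∧
            InvA g s0 (l.foldl (fun acc c =>
              let t := dfsAux f' c g acc.2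
              (acc.1 + t.1, t.2)) (acc, s')).2 N := by
          intro l
          induction l with
          | nil =>
            intro _ acc s' hs'
            exact ⟨by simp, hs'⟩
          | cons c l ihl =>
            intro hl acc s' hs'
            have hc := ih (by omega) c (hl c (List.mem_cons_self ..)) f' (by omega) s' hs'
            simp only [List.foldl_cons]
            have := ihl (fun d hd => hl d (List.mem_cons_of_mem _ hd)) (acc + (dfsAux f' c g s').1) _ hc.2
            simp only [List.map_cons, List.sum_cons]
            exact ⟨this.1.trans (by rw [hc.1, add_assoc]), this.2⟩
        have hr := fold (g.getD n []) hcs 0 s hs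
        set r := (g.getD n []).foldl (fun acc c =>
              let t := dfsAux f' c g acc.2
              (acc.1 + t.1, t.2)) ((0 : Int), s) with hrdef
        have hr1 : r.1 = ((g.getD n []).map (pv g s0 (N + 1))).sum := by rw [hr.1]; ring
        have hpvn : pv g s0 (N + 1) n = ((g.getD n []).map (pv g s0 (N + 1))).sum := by
          simp only [pv, hsn0]
          rw [if_neg (by simp), if_neg h2]
          congr 1
          apply List.map_congr_left
          intro c hc
          exact pv_stab g s0 j c (hcs c hc) N (N + 1) (by omega) (by omega)
        refine ⟨by rw [hr1, hpvn], ?_⟩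
        intro k
        rw [PySem.Dict.getD_insert]
        by_cases hkn' : k = n
        · rw [if_pos hkn']
          subst hkn'
          exact ⟨fun _ => by rw [hr1, hpvn], fun _ => hsn0⟩
        · rw [if_neg hkn']
          exact hr.2 k

-- B-side: soundness of the value table — every entry is the node's stable value
def SoundB (g : PySem.Dict Int (List Int)) (s : PySem.Dict Int Int)
    (val : PySem.Dict Int Int) : Prop :=
  ∀ k w, val.get? k = some w →
    ∃ i, goodS g s i k = true ∧ ∀ f, i ≤ f → pv g s f k = w

-- the seed (truthy salaries) stays in the table
def SeedIn (s val : PySem.Dict Int Int) : Prop :=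
  ∀ p ∈ s.items, p.2 ≠ 0 → val.contains p.1 = true

theorem seed_entries (s : PySem.Dict Int Int) (hnd : s.keys.Nodup) :
    ∀ (l : List (Int × Int)), (∀ p ∈ l, p ∈ s.items) →
    ∀ (val : PySem.Dict Int Int), (∀ k w, val.get? k = some w → w ≠ 0 ∧ s.getD k 0 = w) →
    ∀ k w, (l.foldl (fun val p => if p.2 ≠ 0 then val.insert p.1 p.2 else val) val).get? k
        = some w → w ≠ 0 ∧ s.getD k 0 = w := by
  intro l
  induction l with
  | nil => intro _ val hval; exact hval
  | cons p l ihl =>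
    intro hl val hval
    simp only [List.foldl_cons]
    refine ihl (fun q hq => hl q (List.mem_cons_of_mem _ hq)) _ ?_
    intro k w hw
    split_ifs at hw with hp
    · rw [PySem.Dict.get?_insert] at hw
      by_cases hk : k = p.1
      · rw [if_pos hk] at hw
        subst hk
        rw [Option.some.injEq] at hw
        subst hw
        exact ⟨hp, PySem.Dict.getD_of_mem_items s (hl p (List.mem_cons_self ..)) hnd 0⟩
      · rw [if_neg hk] at hw
        exact hval k w hw
    · exact hval k w hw

theorem seedB_sound (g : PySem.Dict Int (List Int)) (s : PySem.Dict Int Int)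
    (hnd : s.keys.Nodup) : SoundB g s (seedB s) := by
  intro k w hw
  have h := seed_entries s hnd s.items (fun _ h => h) PySem.Dict.empty
    (by intro k w h; rw [PySem.Dict.get?_empty] at h; exact absurd h (by simp)) k w hw
  refine ⟨1, ?_, ?_⟩
  · simp only [goodS, Bool.or_eq_true, decide_eq_true_eq]
    exact Or.inl (h.2 ▸ h.1)
  · intro f hf
    obtain ⟨f', rfl⟩ : ∃ f', f = f' + 1 := ⟨f - 1, by omega⟩
    simp only [pv]
    rw [if_pos (h.2 ▸ h.1)]
    exact h.2

theorem seedB_seedIn (s : PySem.Dict Int Int) : SeedIn s (seedB s) := by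
  have gen : ∀ (l : List (Int × Int)) (val : PySem.Dict Int Int),
      (∀ p ∈ l, p.2 ≠ 0 →
        (l.foldl (fun val p => if p.2 ≠ 0 then val.insert p.1 p.2 else val) val).contains p.1
          = true) ∧
      (∀ k, val.contains k = true →
        (l.foldl (fun val p => if p.2 ≠ 0 then val.insert p.1 p.2 else val) val).contains k
          = true) := by
    intro l
    induction l with
    | nil => exact fun val => ⟨by simp, fun k h => h⟩
    | cons p l ihl =>
      intro val
      constructor
      · intro q hq hq2
        simp only [List.foldl_cons]
        rcases List.mem_cons.mp hq with rfl | htail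
        · apply (ihl _).2
          rw [if_pos hq2]
          exact PySem.Dict.contains_insert_self ..
        · exact (ihl _).1 q htail hq2
      · intro k hk
        simp only [List.foldl_cons]
        apply (ihl _).2
        split_ifs with hp
        · simp [PySem.Dict.contains_insert, hk]
        · exact hk
  exact fun p hp hp2 => (gen s.items PySem.Dict.empty).1 p hp hp2

theorem contains_stepB_mono (val : PySem.Dict Int Int) (p : Int × List Int) (k : Int)
    (h : val.contains k = true) : (stepB val p).contains k = true := by
  unfold stepB
  split_ifs <;> simp [PySem.Dict.contains_insert, h]

theorem contains_foldl_stepB_mono (l : List (Int × List Int))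
    (val : PySem.Dict Int Int) (k : Int) (h : val.contains k = true) :
    (l.foldl stepB val).contains k = true := by
  induction l generalizing val with
  | nil => exact h
  | cons p l ih => exact ih _ (contains_stepB_mono val p k h)

-- a common stable index for the values of a whole children list
theorem children_bound (g : PySem.Dict Int (List Int)) (s : PySem.Dict Int Int)
    (val : PySem.Dict Int Int) (hs : SoundB g s val) :
    ∀ (cs : List Int), (∀ c ∈ cs, val.contains c = true) →
      ∃ j, ∀ c ∈ cs, goodS g s j c = true ∧ ∀ f, j ≤ f → pv g s f c = val.getD c 0 := by
  intro cs
  induction cs with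
  | nil => exact fun _ => ⟨0, by simp⟩
  | cons c cs ihl =>
    intro hcs
    obtain ⟨j, hj⟩ := ihl (fun d hd => hcs d (List.mem_cons_of_mem _ hd))
    obtain ⟨w, hw⟩ : ∃ w, val.get? c = some w := by
      have := PySem.Dict.contains_eq_isSome_get? (d := val) (k := c)
      rw [hcs c (List.mem_cons_self ..)] at this
      exact Option.isSome_iff_exists.mp this.symm
    obtain ⟨i, hi1, hi2⟩ := hs c w hw
    refine ⟨max i j, ?_⟩
    intro d hd
    rcases List.mem_cons.mp hd with rfl | htail
    · refine ⟨goodS_mono g s (le_max_left i j) d hi1, fun f hf => ?_⟩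
      rw [hi2 f (le_trans (le_max_left i j) hf), PySem.Dict.getD_eq_get?_getD, hw,
        Option.getD_some]
    · obtain ⟨h1, h2⟩ := hj d htail
      exact ⟨goodS_mono g s (le_max_right i j) d h1,
        fun f hf => h2 f (le_trans (le_max_right i j) hf)⟩

theorem sound_stepB (g : PySem.Dict Int (List Int)) (s : PySem.Dict Int Int)
    (hndg : g.keys.Nodup)
    (val : PySem.Dict Int Int) (p : Int × List Int) (hp : p ∈ g.items)
    (hseed : SeedIn s val) (hs : SoundB g s val) : SoundB g s (stepB val p) := by
  have hget : g.getD p.1 [] = p.2 := PySem.Dict.getD_of_mem_items g hp hndg []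
  intro k w hw
  unfold stepB at hw
  split_ifs at hw with c1 c2 c3
  · exact hs k w hw
  all_goals try exact hs k w hw
  · -- leaf insert
    rw [PySem.Dict.get?_insert] at hw
    by_cases hk : k = p.1
    · rw [if_pos hk] at hw
      subst hk
      rw [Option.some.injEq] at hw
      subst hw
      have h0 : s.getD p.1 0 = 0 := by
        by_contra h0
        obtain ⟨v, hv⟩ : ∃ v, s.get? p.1 = some v := by
          rcases ho : s.get? p.1 with _ | v
          · rw [PySem.Dict.getD_eq_get?_getD, ho, Option.getD_none] at h0; exact absurd rfl h0
          · exact ⟨v, rfl⟩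
        have hv0 : v ≠ 0 := by
          rw [PySem.Dict.getD_eq_get?_getD, hv, Option.getD_some] at h0; exact h0
        have := hseed (p.1, v) (PySem.Dict.mem_items_of_get?_eq_some s hv) hv0
        exact absurd this (by simp [c1])
      refine ⟨1, ?_, ?_⟩
      · simp only [goodS, Bool.or_eq_true, List.all_eq_true]
        exact Or.inr (by rw [hget, c2]; simp)
      · intro f hf
        obtain ⟨f', rfl⟩ : ∃ f', f = f' + 1 := ⟨f - 1, by omega⟩
        simp only [pv, h0, hget, c2]
        simp
    · rw [if_neg hk] at hw
      exact hs k w hw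
  · -- sum insert
    rw [PySem.Dict.get?_insert] at hw
    by_cases hk : k = p.1
    · rw [if_pos hk] at hw
      subst hk
      rw [Option.some.injEq] at hw
      subst hw
      have h0 : s.getD p.1 0 = 0 := by
        by_contra h0
        obtain ⟨v, hv⟩ : ∃ v, s.get? p.1 = some v := by
          rcases ho : s.get? p.1 with _ | v
          · rw [PySem.Dict.getD_eq_get?_getD, ho, Option.getD_none] at h0; exact absurd rfl h0
          · exact ⟨v, rfl⟩
        have hv0 : v ≠ 0 := by
          rw [PySem.Dict.getD_eq_get?_getD, hv, Option.getD_some] at h0; exact h0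
        have := hseed (p.1, v) (PySem.Dict.mem_items_of_get?_eq_some s hv) hv0
        exact absurd this (by simp [c1])
      obtain ⟨j, hj⟩ := children_bound g s val hs p.2 (by
        intro c hc
        simp only [List.all_eq_true] at c3
        exact c3 c hc)
      refine ⟨j + 1, ?_, ?_⟩
      · simp only [goodS, Bool.or_eq_true, List.all_eq_true]
        exact Or.inr (by rw [hget]; exact fun c hc => (hj c hc).1)
      · intro f hf
        obtain ⟨f', rfl⟩ : ∃ f', f = f' + 1 := ⟨f - 1, by omega⟩
        simp only [pv, h0, hget]
        rw [if_neg (by simp), if_neg c2]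
        congr 1
        apply List.map_congr_left
        intro c hc
        exact (hj c hc).2 f' (by omega)
    · rw [if_neg hk] at hw
      exact hs k w hw

theorem sound_foldB (g : PySem.Dict Int (List Int)) (s : PySem.Dict Int Int)
    (hndg : g.keys.Nodup) :
    ∀ (l : List (Int × List Int)), (∀ p ∈ l, p ∈ g.items) →
    ∀ val, SeedIn s val → SoundB g s val →
      SeedIn s (l.foldl stepB val) ∧ SoundB g s (l.foldl stepB val) := by
  intro l
  induction l with
  | nil => exact fun _ val h1 h2 => ⟨h1, h2⟩
  | cons p l ihl =>
    intro hl val hseed hs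
    simp only [List.foldl_cons]
    exact ihl (fun q hq => hl q (List.mem_cons_of_mem _ hq)) _
      (fun q hq hq2 => contains_stepB_mono val p q.1 (hseed q hq hq2))
      (sound_stepB g s hndg val p (hl p (List.mem_cons_self ..)) hseed hs)

theorem fold_contains (l : List (Int × List Int)) :
    ∀ (k : Int) (cs : List Int) (val : PySem.Dict Int Int),
      (∀ c ∈ cs, val.contains c = true) → (k, cs) ∈ l →
      (l.foldl stepB val).contains k = true := by
  induction l with
  | nil => intro k cs val _ h; simp at h
  | cons p l ih =>
    intro k cs val hcs hmem
    simp only [List.foldl_cons]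
    rcases List.mem_cons.mp hmem with heq | htail
    · subst heq
      apply contains_foldl_stepB_mono
      unfold stepB
      split_ifs with c1 c2 c3
      · exact c1
      · exact PySem.Dict.contains_insert_self ..
      · exact PySem.Dict.contains_insert_self ..
      · exact absurd (List.all_eq_true.mpr (fun c hc => hcs c hc)) c3
    · exact ih k cs _ (fun c hc => contains_stepB_mono val p c (hcs c hc)) htail

theorem complete_passB (g : PySem.Dict Int (List Int)) (s : PySem.Dict Int Int)
    (i : Nat) (val : PySem.Dict Int Int)
    (hseed : SeedIn s val)
    (hval : ∀ k, okS g s i k = true → val.contains k = true) :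
    ∀ k, okS g s (i + 1) k = true → (passB g val).contains k = true := by
  intro k hk
  simp only [okS, Bool.and_eq_true, Bool.or_eq_true, List.all_eq_true,
    decide_eq_true_eq] at hk
  obtain ⟨hks, hk2⟩ := hk
  rcases hk2 with htr | ⟨hkg, hch⟩
  · -- truthy salary: it is in the seed, which persists
    obtain ⟨v, hv⟩ : ∃ v, s.get? k = some v := by
      have := PySem.Dict.contains_eq_isSome_get? (d := s) (k := k)
      rw [hks] at this
      exact Option.isSome_iff_exists.mp this.symm
    have hv0 : v ≠ 0 := by
      rw [PySem.Dict.getD_eq_get?_getD, hv, Option.getD_some] at htr; exact htr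
    exact contains_foldl_stepB_mono g.items val k
      (hseed (k, v) (PySem.Dict.mem_items_of_get?_eq_some s hv) hv0)
  · -- falsy: its graph entry is relaxed once all children are present
    obtain ⟨cs, hcso⟩ : ∃ cs, g.get? k = some cs := by
      have := PySem.Dict.contains_eq_isSome_get? (d := g) (k := k)
      rw [hkg] at this
      exact Option.isSome_iff_exists.mp this.symm
    have hgetd : g.getD k [] = cs := by
      rw [PySem.Dict.getD_eq_get?_getD, hcso, Option.getD_some]
    exact fold_contains g.items k cs val
      (fun c hc => hval c (hch c (hgetd ▸ hc)))
      (PySem.Dict.mem_items_of_get?_eq_some g hcso)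

theorem valIter_props (g : PySem.Dict Int (List Int)) (s : PySem.Dict Int Int)
    (hndg : g.keys.Nodup) (hnds : s.keys.Nodup) :
    ∀ m,
      SeedIn s ((List.range m).foldl (fun val _ => passB g val) (seedB s)) ∧
      SoundB g s ((List.range m).foldl (fun val _ => passB g val) (seedB s)) ∧
      (∀ k, okS g s m k = true →
        ((List.range m).foldl (fun val _ => passB g val) (seedB s)).contains k = true) := by
  intro m
  induction m with
  | zero =>
    refine ⟨seedB_seedIn s, seedB_sound g s hnds, ?_⟩
    intro k h; simp [okS] at h
  | succ m ih =>
    rw [List.range_succ, List.foldl_append]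
    simp only [List.foldl_cons, List.foldl_nil]
    obtain ⟨ih1, ih2, ih3⟩ := ih
    have hsnd := sound_foldB g s hndg g.items (fun _ h => h) _ ih1 ih2
    exact ⟨hsnd.1, hsnd.2, complete_passB g s m _ ih1 ih3⟩

theorem dfs_eq_pv (node : Int) (graph : List (Int × List Int)) (salaries : List (Int × Int))
    (hpre : Pre_dfs node graph salaries) :
    dfs node graph salaries
      = pv (PySem.Dict.ofList graph) (PySem.Dict.ofList salaries)
          ((PySem.Dict.ofList graph).size + 1) node := by
  have hgood := okS_goodS (PySem.Dict.ofList graph) (PySem.Dict.ofList salaries)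
    ((PySem.Dict.ofList graph).size + 1) node hpre
  have hinv : InvA (PySem.Dict.ofList graph) (PySem.Dict.ofList salaries)
      (PySem.Dict.ofList salaries) (PySem.Dict.ofList graph).size := by
    intro k
    refine ⟨fun h => ?_, fun h => h⟩
    simp only [pv]
    rw [if_pos h]
  exact (mainA (PySem.Dict.ofList graph) (PySem.Dict.ofList salaries)
    (PySem.Dict.ofList graph).size ((PySem.Dict.ofList graph).size + 1) (by omega)
    node hgood ((PySem.Dict.ofList graph).size + 1) (by omega)
    (PySem.Dict.ofList salaries) hinv).1

theorem dfs_alt_eq_pv (node : Int) (graph : List (Int × List Int)) (salaries : List (Int × Int))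
    (hpre : Pre_dfs node graph salaries) :
    dfs_alt node graph salaries
      = pv (PySem.Dict.ofList graph) (PySem.Dict.ofList salaries)
          ((PySem.Dict.ofList graph).size + 1) node := by
  have hndg : (PySem.Dict.ofList graph).keys.Nodup := PySem.Dict.nodup_keys_ofList graph
  have hnds : (PySem.Dict.ofList salaries).keys.Nodup := PySem.Dict.nodup_keys_ofList salaries
  obtain ⟨_, hsound, hcompl⟩ := valIter_props (PySem.Dict.ofList graph)
    (PySem.Dict.ofList salaries) hndg hnds ((PySem.Dict.ofList graph).size + 1)
  have hcont := hcompl node hpre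
  obtain ⟨w, hw⟩ : ∃ w, ((List.range ((PySem.Dict.ofList graph).size + 1)).foldl
      (fun val _ => passB (PySem.Dict.ofList graph) val)
      (seedB (PySem.Dict.ofList salaries))).get? node = some w := by
    have := PySem.Dict.contains_eq_isSome_get?
      (d := (List.range ((PySem.Dict.ofList graph).size + 1)).foldl
        (fun val _ => passB (PySem.Dict.ofList graph) val)
        (seedB (PySem.Dict.ofList salaries))) (k := node)
    rw [hcont] at this
    exact Option.isSome_iff_exists.mp this.symm
  obtain ⟨i, hgi, hpvw⟩ := hsound node w hw
  have hgoodN := okS_goodS (PySem.Dict.ofList graph) (PySem.Dict.ofList salaries)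
    ((PySem.Dict.ofList graph).size + 1) node hpre
  have hw2 : pv (PySem.Dict.ofList graph) (PySem.Dict.ofList salaries)
      ((PySem.Dict.ofList graph).size + 1) node = w := by
    rw [← hpvw (max i ((PySem.Dict.ofList graph).size + 1)) (le_max_left ..)]
    exact pv_stab (PySem.Dict.ofList graph) (PySem.Dict.ofList salaries)
      ((PySem.Dict.ofList graph).size + 1) node hgoodN
      ((PySem.Dict.ofList graph).size + 1) (max i ((PySem.Dict.ofList graph).size + 1))
      (by omega) (le_max_right ..)
  simp only [dfs_alt]
  rw [PySem.Dict.getD_eq_get?_getD, hw, Option.getD_some, hw2]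

-- ===== VERDICT (by name: the statement is the Claim_ definition above) =====
theorem dfs_spec : Claim_equal_dfs := by
  intro node graph salaries _ hpre
  unfold Spec_dfs
  rw [dfs_eq_pv node graph salaries hpre, dfs_alt_eq_pv node graph salaries hpre]
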